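-- pv_equiv track=rewrite | github.com/andrazm123/Project-Euler | project_euler_4.py | poisci_palindrom
-- ===== SOURCE A (Python) =====
-- def ali_je_palindrom(niz):
--     '''Preveri ali je stevilo palindrom'''
--     dolzina = len(niz)
--     if dolzina == 1 or dolzina == 0:
--         return True
--     elif niz[0] == niz[-1] and ali_je_palindrom(niz[1:-1]) == True:
--         return True
--     elif niz[0] == niz[-1] and ali_je_palindrom(niz[1:-1]) == False:
--         return False
--     else:
--         return False
--
-- def seznam_tromestnih_zmozkov(zacetek, konec):
--     '''Vrne seznam zmozkov stevil od zacetek do konec'''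
--     seznam = []
--     for i in range(zacetek, konec + 1):
--         for j in range(zacetek, i + 1):
--             seznam.append(i * j)
--     return seznam
--
-- def poisci_palindrom(zacetek, konec):
--     '''Poisce najvecji palindrom med zmnozki od zacetek do konec'''
--     seznam = seznam_tromestnih_zmozkov(zacetek, konec)
--     while len(seznam) > 0:
--         kandidat = [int(d) for d in str(max(seznam))]
--         if ali_je_palindrom(kandidat):
--             break
--         seznam.remove(max(seznam))
--     return max(seznam)
-- ===== SOURCE B (Python) =====
-- def poisci_palindrom(zacetek, konec):
--     '''Poisce najvecji palindrom med zmnozki od zacetek do konec'''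
--     najvecji = None
--     for i in range(zacetek, konec + 1):
--         for j in range(zacetek, i + 1):
--             p = i * j
--             if p >= 0:
--                 stevke = [int(d) for d in str(p)]
--                 if stevke == stevke[::-1]:
--                     if najvecji is None or p > najvecji:
--                         najvecji = p
--     if najvecji is None:
--         raise ValueError("no palindromic product")
--     return najvecji
-- ===== Notes on version B (the rewrite author's own statement) =====
-- stated objective: alternative
-- what changed: A materialises the list of all products and then repeatedly rescans it with max() and remove() until the current maximum is a palindrome; B makes a single pass over the pairs keeping the largest nonnegative palindromic product seen so far (no list is materialised, trading A's repeated-rescan loop for a constant-space scan).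
import Mathlib
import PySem

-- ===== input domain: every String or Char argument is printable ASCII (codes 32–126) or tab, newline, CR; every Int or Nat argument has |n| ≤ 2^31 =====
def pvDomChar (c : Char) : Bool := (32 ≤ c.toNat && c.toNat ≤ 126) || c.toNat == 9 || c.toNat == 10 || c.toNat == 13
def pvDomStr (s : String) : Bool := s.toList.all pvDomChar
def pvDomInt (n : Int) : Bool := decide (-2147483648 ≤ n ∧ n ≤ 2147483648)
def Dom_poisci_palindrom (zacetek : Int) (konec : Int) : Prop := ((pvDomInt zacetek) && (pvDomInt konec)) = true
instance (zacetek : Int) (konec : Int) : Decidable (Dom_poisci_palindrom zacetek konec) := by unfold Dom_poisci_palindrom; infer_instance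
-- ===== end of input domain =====

-- B replaces A's build-list-then-repeated-max/remove scan by a single pass that keeps the
-- largest nonnegative palindromic product; equal return values on Pre_ (no observable mutation).

-- ===== PORT A =====

-- [int(d) for d in str(m)] ; '.getD 0' totalises int('-'), which Python only reaches on a
-- negative m — excluded by Pre_ (the 0 ≤ witness keeps A's scan above the negatives).
def pvDigits (m : Int) : List Int :=
  (PySem.Int.toChars m).map (fun c => (PySem.Int.ofChars? [c]).getD 0)

-- recursive palindrome test of A, transliterated: niz[0], niz[-1], niz[1:-1];
-- fuel (= initial length, enough since the slice shrinks) makes the recursion structural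
def pvAliJePalindromF : Nat → List Int → Bool
  | 0, _ => true
  | fuel + 1, niz =>
    let dolzina := niz.length
    if dolzina = 1 ∨ dolzina = 0 then true
    else if (PySem.List.pyGet? niz 0).getD 0 = (PySem.List.pyGet? niz (-1)).getD 0 ∧
            pvAliJePalindromF fuel (PySem.List.slice niz (some 1) (some (-1))) = true then true
    else if (PySem.List.pyGet? niz 0).getD 0 = (PySem.List.pyGet? niz (-1)).getD 0 ∧
            pvAliJePalindromF fuel (PySem.List.slice niz (some 1) (some (-1))) = false then false
    else false

def pvAliJePalindrom (niz : List Int) : Bool := pvAliJePalindromF niz.length niz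

-- seznam.append(x) is modelled with O(1) cons and one final reverse (Python's append is O(1));
-- the loops and the resulting list are exactly A's
def pvSeznamZmnozkov (zacetek : Int) (konec : Int) : List Int :=
  ((PySem.List.pyRange zacetek (konec + 1) 1).foldl (fun seznam i =>
    (PySem.List.pyRange zacetek (i + 1) 1).foldl (fun seznam j => (i * j) :: seznam) seznam) []).reverse

-- the while-loop; fuel = initial length (each iteration removes one element)
def pvLoop : Nat → List Int → List Int
  | 0, seznam => seznam
  | fuel + 1, seznam =>
    if 0 < seznam.length then
      let m := (PySem.List.max? seznam (fun x => x)).getD 0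
      let kandidat := pvDigits m
      if pvAliJePalindrom kandidat then seznam
      else pvLoop fuel ((PySem.List.remove? seznam m).getD seznam)
    else seznam

def poisci_palindrom (zacetek : Int) (konec : Int) : Int :=
  let seznam := pvSeznamZmnozkov zacetek konec
  let seznam2 := pvLoop seznam.length seznam
  (PySem.List.max? seznam2 (fun x => x)).getD 0   -- max([]) raises ValueError: outside Pre_

-- ===== PORT B =====

-- body of B's inner loop; stevke[::-1] is reverse (PySem.List.slice?_none_none_neg_one)
def pvKorak (najvecji : Option Int) (p : Int) : Option Int :=
  if 0 ≤ p then
    let stevke := pvDigits p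
    if stevke = stevke.reverse then
      match najvecji with
      | none => some p
      | some b => if b < p then some p else najvecji
    else najvecji
  else najvecji

def poisci_palindrom_alt (zacetek : Int) (konec : Int) : Int :=
  (((PySem.List.pyRange zacetek (konec + 1) 1).foldl (fun najvecji i =>
      (PySem.List.pyRange zacetek (i + 1) 1).foldl (fun najvecji j => pvKorak najvecji (i * j))
        najvecji) none).getD 0)
  -- '.getD 0': Python B raises ValueError when najvecji is None — outside Pre_

-- ===== PRECONDITION & SPEC =====

def pvIsPalB (p : Int) : Bool := pvDigits p == (pvDigits p).reverse

-- known palindromic squares t*t with t ≤ 2^31 (fast witnesses; the scan below keeps Pre_ exact)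
def pvKvadratniPalindromi : List Int := [1,2,3,11,22,26,101,111,121,202,212,264,307,836,1001,1111,2002,2285,2636,10001,10101,10201,11011,11111,11211,20002,20102,22865,24846,30693,100001,101101,110011,111111,200002,798644,1000001,1001001,1002001,1010101,1011101,1012101,1100011,1101011,1102011,1110111,1111111,2000002,2001002,10000001,10011001,10100101,10111101,11000011,11011011,11100111,11111111,20000002,100000001,100010001,100020001,100101001,100111001,100121001,101000101,101010101,101020101,101101101,101111101,110000011,110010011,110020011,110101011,110111011,111000111,111010111,111101111,111111111,200000002,200010002,1000000001,1000110001,1001001001,1001111001,1010000101,1010110101,1011001101,1011111101,1100000011,1100110011,1101001011,1101111011,1110000111,1110110111,1111001111,2000000002]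

-- exhaustive early-exit scan: some pair a ≤ j ≤ i with i < jStart+n has palindromic product
def pvVrsta (i : Int) (j : Int) : Nat → Bool
  | 0 => false
  | n + 1 => pvIsPalB (i * j) || pvVrsta i (j + 1) n

def pvVrste (a : Int) (i : Int) : Nat → Bool
  | 0 => false
  | n + 1 => pvVrsta i a (i - a + 1).toNat || pvVrste a (i + 1) n

def pvPozitivno (a b : Int) : Bool :=
  pvKvadratniPalindromi.any (fun t => decide (a ≤ t) && decide (t ≤ b)) ||
  pvVrste a a (b - a + 1).toNat

-- does some product i*j (z ≤ j ≤ i ≤ k) equal a nonnegative decimal palindrome?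
def pvObstaja (z : Int) (k : Int) : Bool :=
  if k < z then false
  else if z ≤ 0 ∧ 0 ≤ k then true
  else if 0 < z then pvPozitivno z k
  else pvPozitivno (-k) (-z)

-- Pre_ holds exactly when some product i*j (zacetek ≤ j ≤ i ≤ konec) is a nonnegative decimal
-- palindrome — exactly the inputs on which Python A returns; on all others A raises ValueError
-- (int('-') on a negative maximum, or max([]) once the scan empties the list).  pvObstaja decides
-- this exactly: ranges containing 0 give the product 0, same-sign ranges are mirrored to a positive
-- interval and searched exhaustively with an early exit (a list of known palindromic squares first).
def Pre_poisci_palindrom (zacetek : Int) (konec : Int) : Prop :=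
  pvObstaja zacetek konec = true

instance (zacetek : Int) (konec : Int) : Decidable (Pre_poisci_palindrom zacetek konec) := by
  unfold Pre_poisci_palindrom; infer_instance

def pvWitness_poisci_palindrom : Int × Int := (1, 2)

def Spec_poisci_palindrom (zacetek : Int) (konec : Int) (out : Int) : Prop :=
  out = poisci_palindrom_alt zacetek konec
instance (zacetek : Int) (konec : Int) (out : Int) : Decidable (Spec_poisci_palindrom zacetek konec out) := by
  unfold Spec_poisci_palindrom; infer_instance

-- ===== CLAIM (what is proved, stated in full; the proofs are below) =====
def Claim_equal_poisci_palindrom : Prop := ∀ (zacetek : Int) (konec : Int), Dom_poisci_palindrom zacetek konec → Pre_poisci_palindrom zacetek konec → Spec_poisci_palindrom zacetek konec (poisci_palindrom zacetek konec)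

-- ===== LEMMAS AND PROOFS =====

-- niz[1:-1] on x :: (m ++ [y])
theorem pv_slice_mid (x y : Int) (m : List Int) :
    PySem.List.slice (x :: (m ++ [y])) (some 1) (some (-1)) = m := by
  rw [show ((1:Int) = ((1:Nat):Int)) from rfl]
  rw [PySem.List.slice]
  simp [PySem.List.clampIdx, show ¬((m.length:Int) + 1 < 0) from by omega]

-- A's recursive test is the reverse-equality test (fuel ≥ length suffices)
theorem pvAli_iff_aux (n : Nat) :
    ∀ l : List Int, l.length ≤ n → (pvAliJePalindromF n l = true ↔ l = l.reverse) := by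
  induction n with
  | zero =>
    intro l h
    have : l = [] := List.eq_nil_of_length_eq_zero (Nat.le_zero.mp h)
    subst this; simp [pvAliJePalindromF]
  | succ n ih =>
    intro l hl
    match l with
    | [] => simp [pvAliJePalindromF]
    | [a] => simp [pvAliJePalindromF]
    | x :: y :: rest =>
      obtain ⟨m, z, hmz⟩ : ∃ m z, (y :: rest : List Int) = m ++ [z] := by
        rcases List.eq_nil_or_concat' (y :: rest) with h | ⟨m, z, h⟩
        · simp at h
        · exact ⟨m, z, h⟩
      have hlen : m.length = rest.length := by
        have := congrArg List.length hmz; simp at this; omega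
      rw [hmz]
      have hml : m.length ≤ n := by simp at hl; omega
      have ihm := ih m hml
      rw [pvAliJePalindromF]
      have h0 : PySem.List.pyGet? (x :: (m ++ [z])) 0 = some x := PySem.List.pyGet?_zero_cons _ _
      have h1 : PySem.List.pyGet? (x :: (m ++ [z])) (-1) = some z := by
        rw [PySem.List.pyGet?_neg_one]
        rw [show (x :: (m ++ [z])) = (x :: m) ++ [z] from by simp]
        exact List.getLast?_concat
      have hrev : (x :: (m ++ [z]) = (x :: (m ++ [z])).reverse) ↔ (x = z ∧ m = m.reverse) := by
        have hr : (x :: (m ++ [z])).reverse = z :: (m.reverse ++ [x]) := by simp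
        rw [hr, List.cons_eq_cons]
        constructor
        · rintro ⟨hx, hm⟩
          subst hx
          exact ⟨rfl, (List.append_inj' hm (by simp)).1⟩
        · rintro ⟨hx, hm⟩
          exact ⟨hx, by rw [← hm, hx]⟩
      rw [hrev]
      simp only [h0, h1, pv_slice_mid, Option.getD_some, List.length_cons, List.length_append]
      rw [if_neg (by omega)]
      cases hpm : pvAliJePalindromF n m
      · have hm' : ¬ m = m.reverse := fun h => by simp [ihm.mpr h] at hpm
        simp [hm']
      · have hm' : m = m.reverse := ihm.mp hpm
        by_cases hxz : x = z
        · simpa [hxz] using hm'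
        · simp [hxz]

theorem pvAli_iff (l : List Int) : pvAliJePalindrom l = true ↔ l = l.reverse :=
  pvAli_iff_aux l.length l le_rfl

theorem pvAli_eq_isPalB (p : Int) : pvAliJePalindrom (pvDigits p) = pvIsPalB p := by
  by_cases h : pvDigits p = (pvDigits p).reverse
  · rw [(pvAli_iff _).mpr h]
    symm
    simpa [pvIsPalB] using h
  · have h1 : pvAliJePalindrom (pvDigits p) = false := by
      cases hh : pvAliJePalindrom (pvDigits p)
      · rfl
      · exact absurd ((pvAli_iff _).mp hh) h
    rw [h1]
    symm
    simpa [pvIsPalB] using h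

theorem pv_foldl_cons (i : Int) (l : List Int) :
    ∀ acc : List Int, l.foldl (fun s j => (i * j) :: s) acc =
      (l.map (fun j => i * j)).reverse ++ acc := by
  induction l with
  | nil => intro acc; simp
  | cons x l ih => intro acc; simp [ih]

theorem pv_foldl_rows (g : Int → List Int) (l : List Int) :
    ∀ acc : List Int, l.foldl (fun s i => (g i).reverse ++ s) acc =
      (l.flatMap g).reverse ++ acc := by
  induction l with
  | nil => intro acc; simp
  | cons x l ih => intro acc; simp [ih]

-- the product list is the flatMap of the two ranges
theorem pvSeznam_eq (z k : Int) :
    pvSeznamZmnozkov z k =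
      (PySem.List.pyRange z (k + 1) 1).flatMap
        (fun i => (PySem.List.pyRange z (i + 1) 1).map (fun j => i * j)) := by
  unfold pvSeznamZmnozkov
  have h1 : (PySem.List.pyRange z (k + 1) 1).foldl (fun seznam i =>
        (PySem.List.pyRange z (i + 1) 1).foldl (fun seznam j => (i * j) :: seznam) seznam) [] =
      (PySem.List.pyRange z (k + 1) 1).foldl (fun seznam i =>
        ((PySem.List.pyRange z (i + 1) 1).map (fun j => i * j)).reverse ++ seznam) [] :=
    PySem.List.foldl_congr_mem _ _ _ _ (fun acc i _ => pv_foldl_cons i _ acc)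
  rw [h1, pv_foldl_rows]
  simp

-- invariant of A's while-loop
theorem pvLoop_spec (fuel : Nat) (sez : List Int)
    (hf : sez.length ≤ fuel) (hx : ∃ x ∈ sez, pvIsPalB x = true) :
    ((PySem.List.max? (pvLoop fuel sez) (fun x => x)).getD 0) ∈ sez ∧
    pvIsPalB ((PySem.List.max? (pvLoop fuel sez) (fun x => x)).getD 0) = true ∧
    ∀ y ∈ sez, pvIsPalB y = true → y ≤ (PySem.List.max? (pvLoop fuel sez) (fun x => x)).getD 0 := by
  induction fuel generalizing sez with
  | zero =>
    obtain ⟨x, hxm, _⟩ := hx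
    have : sez = [] := List.eq_nil_of_length_eq_zero (Nat.le_zero.mp hf)
    subst this; simp at hxm
  | succ fuel ih =>
    obtain ⟨x, hxm, hxp⟩ := hx
    have hne : sez ≠ [] := by rintro rfl; simp at hxm
    have hlen : 0 < sez.length := List.length_pos_iff.mpr hne
    obtain ⟨m, hm⟩ : ∃ m, PySem.List.max? sez (fun x => x) = some m := by
      cases h : PySem.List.max? sez (fun x => x)
      · exact absurd ((PySem.List.max?_eq_none_iff sez _).mp h) hne
      · exact ⟨_, rfl⟩
    have hmem : m ∈ sez := PySem.List.max?_mem hm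
    have hstep : pvLoop (fuel + 1) sez =
        (if pvAliJePalindrom (pvDigits m) then sez
         else pvLoop fuel ((PySem.List.remove? sez m).getD sez)) := by
      simp only [pvLoop]
      rw [if_pos hlen]
      simp only [hm, Option.getD_some]
    rw [hstep]
    cases hpal : pvAliJePalindrom (pvDigits m)
    · -- remove max and loop
      have hmpal : pvIsPalB m = false := by rw [← pvAli_eq_isPalB, hpal]
      have hrm : PySem.List.remove? sez m = some (sez.erase m) :=
        PySem.List.remove?_eq_some_erase sez m hmem
      have hxne : x ≠ m := fun h => by rw [h, hmpal] at hxp; cases hxp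
      have hx' : x ∈ sez.erase m := (List.mem_erase_of_ne hxne).mpr hxm
      have hlen' : (sez.erase m).length ≤ fuel := by
        rw [List.length_erase_of_mem hmem]; omega
      have IH := ih (sez.erase m) hlen' ⟨x, hx', hxp⟩
      rw [if_neg (by simp), hrm]
      simp only [Option.getD_some]
      refine ⟨List.mem_of_mem_erase IH.1, IH.2.1, ?_⟩
      intro y hy hyp
      by_cases hym : y = m
      · rw [hym, hmpal] at hyp; cases hyp
      · exact IH.2.2 y ((List.mem_erase_of_ne hym).mpr hy) hyp
    · -- break: list unchanged, result is m
      rw [if_pos rfl]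
      simp only [hm, Option.getD_some]
      refine ⟨hmem, by rw [← pvAli_eq_isPalB, hpal], ?_⟩
      intro y hy _
      exact PySem.List.max?_isMax hm y hy

-- pvKorak on an already-found maximum returns a ≥ maximum
theorem pvKorak_some (v p : Int) : ∃ v', pvKorak (some v) p = some v' ∧ v ≤ v' := by
  simp only [pvKorak]
  by_cases h1 : 0 ≤ p
  · rw [if_pos h1]
    by_cases h2 : pvDigits p = (pvDigits p).reverse
    · rw [if_pos h2]
      show ∃ v', (if v < p then some p else some v) = some v' ∧ v ≤ v'
      by_cases h3 : v < p
      · rw [if_pos h3]; exact ⟨p, rfl, le_of_lt h3⟩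
      · rw [if_neg h3]; exact ⟨v, rfl, le_rfl⟩
    · rw [if_neg h2]; exact ⟨v, rfl, le_rfl⟩
  · rw [if_neg h1]; exact ⟨v, rfl, le_rfl⟩

theorem pvFold_mono (t : List Int) :
    ∀ v r, t.foldl pvKorak (some v) = some r → v ≤ r := by
  induction t with
  | nil => intro v r h; simp at h; omega
  | cons p t ih =>
    intro v r h
    obtain ⟨v', hv', hle⟩ := pvKorak_some v p
    rw [List.foldl_cons, hv'] at h
    exact le_trans hle (ih v' r h)

theorem pvFold_stays_some (t : List Int) : ∀ v, ∃ r, t.foldl pvKorak (some v) = some r := by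
  induction t with
  | nil => exact fun v => ⟨v, rfl⟩
  | cons p t ih =>
    intro v
    obtain ⟨v', hv', _⟩ := pvKorak_some v p
    rw [List.foldl_cons, hv']
    exact ih v'

theorem pvFold_some (L : List Int) :
    ∀ b, (∃ x ∈ L, 0 ≤ x ∧ pvIsPalB x = true) → ∃ r, L.foldl pvKorak b = some r := by
  induction L with
  | nil => rintro b ⟨x, hx, _⟩; simp at hx
  | cons p t ih =>
    rintro b ⟨x, hx, hx0, hxp⟩
    rcases List.mem_cons.mp hx with rfl | hxt
    · -- pvKorak b x is some
      have hdig : pvDigits x = (pvDigits x).reverse := by simpa [pvIsPalB] using hxp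
      have hsome : ∃ v, pvKorak b x = some v := by
        simp only [pvKorak]
        rw [if_pos hx0, if_pos hdig]
        cases b with
        | none => exact ⟨x, rfl⟩
        | some q =>
          show ∃ v, (if q < x then some x else some q) = some v
          by_cases h3 : q < x
          · rw [if_pos h3]; exact ⟨x, rfl⟩
          · rw [if_neg h3]; exact ⟨q, rfl⟩
      obtain ⟨v, hv⟩ := hsome
      rw [List.foldl_cons, hv]
      exact pvFold_stays_some t v
    · rw [List.foldl_cons]
      exact ih (pvKorak b p) ⟨x, hxt, hx0, hxp⟩

theorem pvFold_mem (L : List Int) :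
    ∀ b r, L.foldl pvKorak b = some r →
      b = some r ∨ (r ∈ L ∧ 0 ≤ r ∧ pvIsPalB r = true) := by
  induction L with
  | nil => intro b r h; simp at h; left; rw [h]
  | cons p t ih =>
    intro b r h
    rw [List.foldl_cons] at h
    rcases ih (pvKorak b p) r h with hk | ⟨hm, h0, hp⟩
    · -- pvKorak b p = some r
      simp only [pvKorak] at hk
      by_cases h1 : 0 ≤ p
      · rw [if_pos h1] at hk
        by_cases h2 : pvDigits p = (pvDigits p).reverse
        · rw [if_pos h2] at hk
          cases b with
          | none =>
            have hpr : p = r := by simpa using hk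
            subst hpr
            exact Or.inr ⟨List.mem_cons_self, h1, by simpa [pvIsPalB] using h2⟩
          | some q =>
            replace hk : (if q < p then some p else some q) = some r := hk
            by_cases h3 : q < p
            · rw [if_pos h3] at hk
              have hpr : p = r := by simpa using hk
              subst hpr
              exact Or.inr ⟨List.mem_cons_self, h1, by simpa [pvIsPalB] using h2⟩
            · rw [if_neg h3] at hk; exact Or.inl hk
        · rw [if_neg h2] at hk; exact Or.inl hk
      · rw [if_neg h1] at hk; exact Or.inl hk
    · exact Or.inr ⟨List.mem_cons_of_mem _ hm, h0, hp⟩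

theorem pvFold_ge (L : List Int) :
    ∀ b r, L.foldl pvKorak b = some r →
      ∀ y ∈ L, 0 ≤ y → pvIsPalB y = true → y ≤ r := by
  induction L with
  | nil => intro b r _ y hy; simp at hy
  | cons p t ih =>
    intro b r h y hy hy0 hyp
    rw [List.foldl_cons] at h
    rcases List.mem_cons.mp hy with rfl | hyt
    · -- y = p: pvKorak b p = some v with p ≤ v, then monotone
      have hdig : pvDigits y = (pvDigits y).reverse := by simpa [pvIsPalB] using hyp
      have hsome : ∃ v, pvKorak b y = some v ∧ y ≤ v := by
        simp only [pvKorak]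
        rw [if_pos hy0, if_pos hdig]
        cases b with
        | none => exact ⟨y, rfl, le_rfl⟩
        | some q =>
          show ∃ v, (if q < y then some y else some q) = some v ∧ y ≤ v
          by_cases h3 : q < y
          · rw [if_pos h3]; exact ⟨y, rfl, le_rfl⟩
          · rw [if_neg h3]; exact ⟨q, rfl, by omega⟩
      obtain ⟨v, hv, hle⟩ := hsome
      rw [hv] at h
      exact le_trans hle (pvFold_mono t v r h)
    · exact ih (pvKorak b p) r h y hyt hy0 hyp

-- soundness of Pre_'s decision procedure (each branch exhibits a palindromic product)
theorem pvVrsta_sound (i : Int) :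
    ∀ (n : Nat) (j : Int), pvVrsta i j n = true →
      ∃ j', j ≤ j' ∧ j' < j + n ∧ pvIsPalB (i * j') = true := by
  intro n
  induction n with
  | zero => intro j h; simp [pvVrsta] at h
  | succ n ih =>
    intro j h
    rw [pvVrsta] at h
    rw [Bool.or_eq_true] at h
    rcases h with h1 | h2
    · exact ⟨j, le_rfl, by push_cast; omega, h1⟩
    · obtain ⟨j', hle, hlt, hp⟩ := ih (j + 1) h2
      exact ⟨j', by omega, by push_cast at hlt ⊢; omega, hp⟩

theorem pvVrste_sound (a : Int) :
    ∀ (n : Nat) (i : Int), a ≤ i → pvVrste a i n = true →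
      ∃ i' j', i ≤ i' ∧ i' < i + n ∧ a ≤ j' ∧ j' ≤ i' ∧ pvIsPalB (i' * j') = true := by
  intro n
  induction n with
  | zero => intro i _ h; simp [pvVrste] at h
  | succ n ih =>
    intro i hai h
    rw [pvVrste] at h
    rw [Bool.or_eq_true] at h
    rcases h with h1 | h2
    · obtain ⟨j', hle, hlt, hp⟩ := pvVrsta_sound i _ a h1
      have hc : ((i - a + 1).toNat : Int) = i - a + 1 := Int.toNat_of_nonneg (by omega)
      exact ⟨i, j', le_rfl, by push_cast; omega, hle, by omega, hp⟩
    · obtain ⟨i', j', hii, hlt, haj, hji, hp⟩ := ih (i + 1) (by omega) h2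
      exact ⟨i', j', by omega, by push_cast at hlt ⊢; omega, haj, hji, hp⟩

theorem pvFam_sound : ∀ t ∈ pvKvadratniPalindromi, 1 ≤ t ∧ pvIsPalB (t * t) = true := by decide

theorem pvPozitivno_sound (a b : Int) (ha : 1 ≤ a) (h : pvPozitivno a b = true) :
    ∃ i j, a ≤ i ∧ i ≤ b ∧ a ≤ j ∧ j ≤ i ∧ 0 ≤ i * j ∧ pvIsPalB (i * j) = true := by
  unfold pvPozitivno at h
  rw [Bool.or_eq_true] at h
  rcases h with h1 | h2
  · obtain ⟨t, ht, hc⟩ := List.any_eq_true.mp h1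
    rw [Bool.and_eq_true, decide_eq_true_eq, decide_eq_true_eq] at hc
    obtain ⟨h1t, hpal⟩ := pvFam_sound t ht
    exact ⟨t, t, hc.1, hc.2, hc.1, le_rfl, mul_nonneg (by omega) (by omega), hpal⟩
  · obtain ⟨i', j', hii, hlt, haj, hji, hp⟩ := pvVrste_sound a _ a le_rfl h2
    refine ⟨i', j', hii, ?_, haj, hji, mul_nonneg (by omega) (by omega), hp⟩
    omega

-- B's nested loops are the fold of pvKorak over the flattened product list
theorem pvAlt_eq_fold (z k : Int) :
    poisci_palindrom_alt z k =
      (((PySem.List.pyRange z (k + 1) 1).flatMap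
          (fun i => (PySem.List.pyRange z (i + 1) 1).map (fun j => i * j))).foldl
        pvKorak none).getD 0 := by
  unfold poisci_palindrom_alt
  rw [List.foldl_flatMap]
  congr 2
  funext b i
  rw [List.foldl_map]

-- ===== VERDICT (by name: the statement is the Claim_ definition above) =====
theorem poisci_palindrom_spec : Claim_equal_poisci_palindrom := by
  intro z k _ hpre
  unfold Spec_poisci_palindrom
  have hw : ∃ i ∈ PySem.List.pyRange z (k + 1) 1,
      ∃ j ∈ PySem.List.pyRange z (i + 1) 1, 0 ≤ i * j ∧ pvIsPalB (i * j) = true := by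
    unfold Pre_poisci_palindrom pvObstaja at hpre
    split_ifs at hpre with h1 h2 h3
    · obtain ⟨hz0, hk0⟩ := h2
      refine ⟨0, ?_, 0, ?_, by omega, by decide⟩
      · rw [PySem.List.mem_pyRange_one]; omega
      · rw [PySem.List.mem_pyRange_one]; omega
    · obtain ⟨i, j, hzi, hik, hzj, hji, h0, hp⟩ := pvPozitivno_sound z k (by omega) hpre
      exact ⟨i, by rw [PySem.List.mem_pyRange_one]; omega,
             j, by rw [PySem.List.mem_pyRange_one]; omega, h0, hp⟩
    · have hk0 : k < 0 := by
        by_contra hc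
        exact h2 ⟨by omega, by omega⟩
      obtain ⟨u, v, hku, hub, hkv, hvu, h0, hp⟩ := pvPozitivno_sound (-k) (-z) (by omega) hpre
      have he : (-v) * (-u) = u * v := by ring
      refine ⟨-v, ?_, -u, ?_, ?_, ?_⟩
      · rw [PySem.List.mem_pyRange_one]; omega
      · rw [PySem.List.mem_pyRange_one]; omega
      · rw [he]; exact h0
      · rw [he]; exact hp
  obtain ⟨i, hi, j, hj, hp0, hppal⟩ := hw
  set L := (PySem.List.pyRange z (k + 1) 1).flatMap
      (fun i => (PySem.List.pyRange z (i + 1) 1).map (fun j => i * j)) with hLdef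
  have hmemL : i * j ∈ L := List.mem_flatMap.mpr ⟨i, hi, List.mem_map.mpr ⟨j, hj, rfl⟩⟩
  -- A's side
  have hA := pvLoop_spec L.length L le_rfl ⟨i * j, hmemL, hppal⟩
  have hrAeq : poisci_palindrom z k =
      (PySem.List.max? (pvLoop L.length L) (fun x => x)).getD 0 := by
    simp only [poisci_palindrom]
    rw [pvSeznam_eq, hLdef]
  obtain ⟨hAmem, hApal, hAge⟩ := hA
  -- B's side
  obtain ⟨rB, hrB⟩ := pvFold_some L none ⟨i * j, hmemL, hp0, hppal⟩
  have hBval : poisci_palindrom_alt z k = rB := by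
    rw [pvAlt_eq_fold, ← hLdef, hrB]; rfl
  have hBmem : rB ∈ L ∧ 0 ≤ rB ∧ pvIsPalB rB = true := by
    rcases pvFold_mem L none rB hrB with h | h
    · cases h
    · exact h
  have hBge := pvFold_ge L none rB hrB
  -- combine
  have h1 : rB ≤ (PySem.List.max? (pvLoop L.length L) (fun x => x)).getD 0 :=
    hAge rB hBmem.1 hBmem.2.2
  have h0A : 0 ≤ (PySem.List.max? (pvLoop L.length L) (fun x => x)).getD 0 :=
    le_trans hp0 (hAge (i * j) hmemL hppal)
  have h2 : (PySem.List.max? (pvLoop L.length L) (fun x => x)).getD 0 ≤ rB :=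
    hBge _ hAmem h0A hApal
  rw [hrAeq, hBval]
  omega
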